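-- pv_equiv track=rewrite | github.com/UCSD-ECE140/ece-140b-spring-2023-final-project-driverbuddy | Server_code/app/src/utils/driving_scorer.py | calculate_hard_braking_count
-- ===== SOURCE A (Python) =====
-- def calculate_hard_braking_count(longitudinal_acceleration_data): # x axis
--     # Initialize variables
--     hard_braking_count = 0
--     is_hard_braking = False
--     deceleration_threshold = 200 # change later
--
--     # Iterate over the acceleration data
--     for i in range(1, len(longitudinal_acceleration_data)):
--         current_acc = longitudinal_acceleration_data[i]
--         previous_acc = longitudinal_acceleration_data[i - 1]
--
--         deceleration = current_acc - previous_acc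
--
--         if deceleration < deceleration_threshold:
--             if not is_hard_braking:
--                 is_hard_braking = True
--                 hard_braking_count += 1
--         else:
--             is_hard_braking = False
--
--     return hard_braking_count
-- ===== SOURCE B (Python) =====
-- def calculate_hard_braking_count(longitudinal_acceleration_data): # x axis
--     # Run-structured scan: no per-element state flag. The outer loop stands at the
--     # start of a region; when a braking step is found it counts one event and the
--     # inner loop consumes the whole maximal braking run before resuming.
--     data = longitudinal_acceleration_data
--     n = len(data)
--     count = 0
--     i = 1
--     while i < n:
--         if data[i] - data[i - 1] < 200:
--             count += 1
--             i += 1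
--             while i < n and data[i] - data[i - 1] < 200:
--                 i += 1
--         else:
--             i += 1
--     return count
-- ===== Notes on version B (the rewrite author's own statement) =====
-- stated objective: alternative
-- what changed: Replaces A's per-element boolean state flag with run-structured control flow: an outer loop that counts one event per braking run and an inner loop that consumes the whole maximal run before resuming.
import Mathlib
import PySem

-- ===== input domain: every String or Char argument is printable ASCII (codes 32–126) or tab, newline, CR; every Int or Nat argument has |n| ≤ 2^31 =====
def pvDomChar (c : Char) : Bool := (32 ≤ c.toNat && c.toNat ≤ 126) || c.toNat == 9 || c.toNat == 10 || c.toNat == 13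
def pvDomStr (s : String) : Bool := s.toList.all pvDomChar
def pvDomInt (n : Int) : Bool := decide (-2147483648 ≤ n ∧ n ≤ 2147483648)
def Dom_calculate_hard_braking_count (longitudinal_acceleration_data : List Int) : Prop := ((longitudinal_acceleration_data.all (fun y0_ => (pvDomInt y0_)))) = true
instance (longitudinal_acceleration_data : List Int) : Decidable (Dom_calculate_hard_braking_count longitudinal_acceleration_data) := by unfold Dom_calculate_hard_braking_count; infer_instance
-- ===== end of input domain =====

-- B replaces A's per-element boolean state flag by run-structured control flow
-- (outer loop counts one event per braking run, inner loop consumes the run);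
-- alternative decomposition, same O(n) cost.

-- ===== PORT A =====
def calculate_hard_braking_count (longitudinal_acceleration_data : List Int) : Int :=
  -- state = (hard_braking_count, is_hard_braking); deceleration_threshold = 200
  (((PySem.List.pyRange 1 (longitudinal_acceleration_data.length : Int) 1).foldl
    (fun (st : Int × Bool) i =>
      let current_acc := PySem.List.pyGetD longitudinal_acceleration_data i 0
      let previous_acc := PySem.List.pyGetD longitudinal_acceleration_data (i - 1) 0
      let deceleration := current_acc - previous_acc
      if deceleration < 200 then
        if !st.2 then (st.1 + 1, true) else st
      else (st.1, false))
    (0, false))).1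

-- ===== PORT B =====
-- inner while loop of Source B: consume the rest of the current braking run;
-- returns (last element consumed = new "previous", remaining suffix)
def pvConsumeRun (prev : Int) : List Int → Int × List Int
  | [] => (prev, [])
  | x :: t => if x - prev < 200 then pvConsumeRun x t else (prev, x :: t)

lemma pvConsumeRun_len (prev : Int) (l : List Int) :
    (pvConsumeRun prev l).2.length ≤ l.length := by
  induction l generalizing prev with
  | nil => simp [pvConsumeRun]
  | cons x t ih =>
    simp only [pvConsumeRun]
    split
    · exact le_trans (ih x) (by simp)
    · simp

-- outer while loop of Source B, walking with the previous element
def pvRunScan (prev : Int) : List Int → Int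
  | [] => 0
  | x :: t =>
    if x - prev < 200 then
      let r := pvConsumeRun x t
      1 + pvRunScan r.1 r.2
    else pvRunScan x t
termination_by l => l.length
decreasing_by
  · exact Nat.lt_succ_of_le (pvConsumeRun_len x t)
  · simp

def calculate_hard_braking_count_alt (longitudinal_acceleration_data : List Int) : Int :=
  match longitudinal_acceleration_data with
  | [] => 0
  | h :: t => pvRunScan h t

-- ===== PRECONDITION & SPEC =====
def Spec_calculate_hard_braking_count (longitudinal_acceleration_data : List Int) (out : Int) : Prop := out = calculate_hard_braking_count_alt longitudinal_acceleration_data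
instance (longitudinal_acceleration_data : List Int) (out : Int) : Decidable (Spec_calculate_hard_braking_count longitudinal_acceleration_data out) := by unfold Spec_calculate_hard_braking_count; infer_instance

-- ===== CLAIM (what is proved, stated in full; the proofs are below) =====
def Claim_equal_calculate_hard_braking_count : Prop := ∀ (longitudinal_acceleration_data : List Int), Dom_calculate_hard_braking_count longitudinal_acceleration_data → Spec_calculate_hard_braking_count longitudinal_acceleration_data (calculate_hard_braking_count longitudinal_acceleration_data)

-- ===== LEMMAS AND PROOFS =====

-- A's index range maps to the list of consecutive pairs.
lemma map_pairs (xs : List Int) :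
    (PySem.List.pyRange 1 (xs.length : Int) 1).map
      (fun i => (PySem.List.pyGetD xs (i - 1) 0, PySem.List.pyGetD xs i 0))
      = xs.zip xs.tail := by
  rw [PySem.List.pyRange_one]
  apply List.ext_getElem
  · simp [List.length_zip]
  · intro j h1 h2
    simp only [List.getElem_map, List.getElem_range, List.getElem_zip, List.getElem_tail]
    simp only [List.length_map, List.length_range] at h1
    rw [Prod.mk.injEq]
    constructor
    · rw [show (1:Int) + (j:Int) - 1 = ((j : Nat):Int) by ring]
      rw [PySem.List.pyGetD_natCast]
      simp [List.getD, List.getElem?_eq_getElem (by omega : j < xs.length)]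
    · rw [show (1:Int) + (j:Int) = ((j+1 : Nat):Int) by push_cast; ring]
      rw [PySem.List.pyGetD_natCast]
      simp [List.getD, List.getElem?_eq_getElem (by omega : j+1 < xs.length)]

-- A's flagged fold over the pair list equals the run-structured scan:
-- in the "not braking" state it is pvRunScan, in the "braking" state it first
-- consumes the current run.
lemma fold_run (t : List Int) : ∀ (prev : Int) (c : Int),
    ((((prev :: t).zip t).foldl
        (fun (st : Int × Bool) p =>
          if p.2 - p.1 < 200 then (if !st.2 then (st.1 + 1, true) else st)
          else (st.1, false)) (c, false))).1 = c + pvRunScan prev t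
    ∧ ((((prev :: t).zip t).foldl
        (fun (st : Int × Bool) p =>
          if p.2 - p.1 < 200 then (if !st.2 then (st.1 + 1, true) else st)
          else (st.1, false)) (c, true))).1
      = c + pvRunScan (pvConsumeRun prev t).1 (pvConsumeRun prev t).2 := by
  induction t with
  | nil => intro prev c; simp [pvRunScan, pvConsumeRun]
  | cons x t' ih =>
    intro prev c
    constructor
    · simp only [List.zip_cons_cons, List.foldl_cons]
      by_cases h : x - prev < 200
      · simp only [h, reduceIte, Bool.not_false]
        rw [(ih x (c+1)).2]
        simp [pvRunScan, h]
        ring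
      · simp only [h, reduceIte]
        rw [(ih x c).1]
        simp [pvRunScan, h]
    · simp only [List.zip_cons_cons, List.foldl_cons]
      by_cases h : x - prev < 200
      · simp only [h, reduceIte, Bool.not_true, Bool.false_eq_true, if_false]
        rw [(ih x c).2]
        simp [pvConsumeRun, h]
      · simp only [h, reduceIte]
        rw [(ih x c).1]
        simp only [pvConsumeRun, h, reduceIte]
        simp [pvRunScan, h]

-- ===== VERDICT (by name: the statement is the Claim_ definition above) =====
theorem calculate_hard_braking_count_spec : Claim_equal_calculate_hard_braking_count := by
  intro xs _
  show calculate_hard_braking_count xs = calculate_hard_braking_count_alt xs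
  have hA : calculate_hard_braking_count xs
      = ((xs.zip xs.tail).foldl
          (fun (st : Int × Bool) p =>
            if p.2 - p.1 < 200 then (if !st.2 then (st.1 + 1, true) else st)
            else (st.1, false)) (0, false)).1 := by
    unfold calculate_hard_braking_count
    rw [← map_pairs xs, List.foldl_map]
  rw [hA]
  cases xs with
  | nil => simp [calculate_hard_braking_count_alt]
  | cons h t =>
    simp only [calculate_hard_braking_count_alt, List.tail_cons]
    rw [(fold_run t h 0).1]
    ring
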